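-- pv_equiv track=rewrite | github.com/zubie7a/Algorithms | CodeSignal/Challenges/MZ/05_Alliance_Help.py | allianceHelp
-- ===== SOURCE A (Python) =====
-- def allianceHelp(t, alliance_size):
--     # Given initial t seconds it takes to build the military academy,
--     # and a given number of alliance_size, determine how long it will
--     # take to build it considering each member of the alliance can
--     # give you a boost of 10% of initial construction time or 1 minute
--     # (whichever is greater).
--
--     # There's a limit of 10 boosts, so no matter your alliance size,
--     # the boost times caps at 10.
--     alliance_size = min(alliance_size, 10)
--     time = t
--     for i in range(alliance_size):
--         # Time will potentially decrease to 1/10th.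
--         time_decreased = t//10
--         # But if that's less than 1min~60sec, bump it up.
--         time_decreased = max(time_decreased, 60)
--         # Reduce the time it takes by that amount.
--         time -= time_decreased
--     # If it takes a negative time, then make it 0 and it will be build
--     # immediately.
--     time = max(time, 0)
--
--     return time
-- ===== SOURCE B (Python) =====
-- def allianceHelp(t, alliance_size):
--     n = max(min(alliance_size, 10), 0)
--     decrement = max(t // 10, 60)
--     return max(t - n * decrement, 0)
-- ===== Notes on version B (the rewrite author's own statement) =====
-- stated objective: simpler
-- what changed: Replaced the repeated-subtraction loop with a closed-form expression: clamp the boost count n to [0,10] and return max(t - n*max(t//10,60), 0).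
import Mathlib
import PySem

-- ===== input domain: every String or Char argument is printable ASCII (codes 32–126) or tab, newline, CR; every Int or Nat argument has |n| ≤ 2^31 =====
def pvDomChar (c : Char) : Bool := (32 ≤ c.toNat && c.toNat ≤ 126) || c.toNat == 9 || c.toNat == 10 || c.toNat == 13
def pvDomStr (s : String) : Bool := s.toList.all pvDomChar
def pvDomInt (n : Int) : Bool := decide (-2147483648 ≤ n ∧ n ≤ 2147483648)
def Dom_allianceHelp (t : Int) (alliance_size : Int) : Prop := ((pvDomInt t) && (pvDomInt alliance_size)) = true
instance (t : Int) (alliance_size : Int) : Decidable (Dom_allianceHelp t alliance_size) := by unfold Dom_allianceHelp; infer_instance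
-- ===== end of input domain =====

-- ===== PORT A =====
-- A: cap alliance_size at 10, loop subtracting max(t//10, 60) each iteration, clamp at 0
def allianceHelp (t : Int) (alliance_size : Int) : Int :=
  let alliance_size := min alliance_size 10
  let time := t
  let time := (PySem.List.pyRange 0 alliance_size 1).foldl
    (fun time _ =>
      let time_decreased := PySem.Int.floordiv t 10
      let time_decreased := max time_decreased 60
      time - time_decreased) time
  max time 0

-- ===== PORT B =====
-- B: closed-form, no loop
def allianceHelp_alt (t : Int) (alliance_size : Int) : Int :=
  let n := max (min alliance_size 10) 0
  let decrement := max (PySem.Int.floordiv t 10) 60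
  max (t - n * decrement) 0

-- ===== PRECONDITION & SPEC =====
def Spec_allianceHelp (t : Int) (alliance_size : Int) (out : Int) : Prop := out = allianceHelp_alt t alliance_size
instance (t : Int) (alliance_size : Int) (out : Int) : Decidable (Spec_allianceHelp t alliance_size out) := by unfold Spec_allianceHelp; infer_instance

-- ===== CLAIM (what is proved, stated in full; the proofs are below) =====
def Claim_equal_allianceHelp : Prop := ∀ (t : Int) (alliance_size : Int), Dom_allianceHelp t alliance_size → Spec_allianceHelp t alliance_size (allianceHelp t alliance_size)

-- ===== LEMMAS AND PROOFS =====

-- ===== VERDICT (by name: the statement is the Claim_ definition above) =====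
theorem foldl_const_sub (d : Int) (l : List Int) (x : Int) :
    l.foldl (fun time _ => time - d) x = x - l.length * d := by
  induction l generalizing x with
  | nil => simp
  | cons a tl ih => simp [List.foldl, ih]; ring

theorem allianceHelp_spec : Claim_equal_allianceHelp := by
  intro t a _
  unfold Spec_allianceHelp allianceHelp allianceHelp_alt
  simp only [foldl_const_sub, PySem.List.length_pyRange_one]
  have : ((min a 10 - 0).toNat : Int) = max (min a 10) 0 := by omega
  rw [this]
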